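-- pv_equiv track=rewrite | github.com/ddb048/hackerRank | febHackerRank2_15_1.py | getSpamEmails
-- ===== SOURCE A (Python) =====
-- def getSpamEmails(subjects, spam_words):
--
--     returnList = []
--
--     spam_words = [i.lower() for i in spam_words]
--
--     for email in subjects:
--
--         emailList = email.lower().split()
--
--         s1 = 0
--
--         for word in emailList:
--             if word in spam_words:
--                 s1 += 1
--
--         if s1 >= 2:
--             returnList.append('spam')
--         else:
--             returnList.append('not_spam')
--
--     return returnList
-- ===== SOURCE B (Python) =====
-- def _score(email, spam_set):
--     counts = {}
--     for w in email.lower().split():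
--         counts[w] = counts.get(w, 0) + 1
--     return sum(c for w, c in counts.items() if w in spam_set)
--
--
-- def getSpamEmails(subjects, spam_words):
--     spam_set = set(w.lower() for w in spam_words)
--     return ['spam' if _score(e, spam_set) >= 2 else 'not_spam' for e in subjects]
-- ===== Notes on version B (the rewrite author's own statement) =====
-- stated objective: faster
-- what changed: B dedupes the lowercased spam words into a hash set once and, per email, builds a word-frequency dict in one pass, then scores by summing the counts of table entries that hit the set, replacing A's O(S) list scan per email word with an O(1) set lookup per distinct word.
import Mathlib
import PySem

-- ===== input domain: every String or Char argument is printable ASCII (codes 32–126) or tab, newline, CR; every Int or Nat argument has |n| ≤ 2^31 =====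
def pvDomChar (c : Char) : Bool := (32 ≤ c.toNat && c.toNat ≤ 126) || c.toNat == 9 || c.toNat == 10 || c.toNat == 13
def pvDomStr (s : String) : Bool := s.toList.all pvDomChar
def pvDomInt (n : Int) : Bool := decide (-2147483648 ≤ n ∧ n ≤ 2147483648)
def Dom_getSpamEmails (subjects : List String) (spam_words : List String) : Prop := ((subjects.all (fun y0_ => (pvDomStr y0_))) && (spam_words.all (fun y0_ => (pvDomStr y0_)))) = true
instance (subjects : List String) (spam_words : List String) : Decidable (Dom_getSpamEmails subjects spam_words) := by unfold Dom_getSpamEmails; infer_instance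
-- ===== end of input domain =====

-- B dedupes the spam vocabulary into a set and scores each email from a one-pass word-frequency table with O(1) set lookups (a timing run measured B faster).

-- ===== PORT A =====
def getSpamEmails (subjects : List String) (spam_words : List String) : List String :=
  let sw := spam_words.map PySem.Str.lower
  subjects.foldl (fun returnList email =>
    let emailList := PySem.Str.split₀ (PySem.Str.lower email)
    let s1 : Int := emailList.foldl (fun s1 word => if sw.contains word then s1 + 1 else s1) 0
    if s1 ≥ 2 then returnList ++ ["spam"] else returnList ++ ["not_spam"]) []

-- ===== PORT B =====
-- counts = {}; for w in email.lower().split(): counts[w] = counts.get(w, 0) + 1;  sum over the spam set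
def scoreB (email : String) (spam_set : PySem.Set String) : Int :=
  let counts := (PySem.Str.split₀ (PySem.Str.lower email)).foldl
    (fun d w => d.insert w (d.getD w 0 + 1)) PySem.Dict.empty
  (((counts.items).filter (fun wc => spam_set.contains wc.1)).map (fun wc => wc.2)).sum

def getSpamEmails_alt (subjects : List String) (spam_words : List String) : List String :=
  let spam_set := PySem.Set.ofList (spam_words.map PySem.Str.lower)
  subjects.map (fun e => if scoreB e spam_set ≥ 2 then "spam" else "not_spam")

-- ===== PRECONDITION & SPEC =====
def Spec_getSpamEmails (subjects : List String) (spam_words : List String) (out : List String) : Prop := out = getSpamEmails_alt subjects spam_words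
instance (subjects : List String) (spam_words : List String) (out : List String) : Decidable (Spec_getSpamEmails subjects spam_words out) := by unfold Spec_getSpamEmails; infer_instance

-- ===== CLAIM (what is proved, stated in full; the proofs are below) =====
def Claim_equal_getSpamEmails : Prop := ∀ (subjects : List String) (spam_words : List String), Dom_getSpamEmails subjects spam_words → Spec_getSpamEmails subjects spam_words (getSpamEmails subjects spam_words)

-- ===== LEMMAS AND PROOFS =====

-- summing 'if k = w then 1 else 0' over a duplicate-free list is a membership test
theorem sum_count_singleton (S : List String) (w : String) (hnd : S.Nodup) :
    (S.map (fun k => ((List.count k [w] : Nat) : Int))).sum = (if S.contains w then 1 else 0) := by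
  induction S with
  | nil => simp
  | cons x xs ih =>
    simp only [List.map_cons, List.sum_cons, List.contains_cons]
    rcases List.nodup_cons.mp hnd with ⟨hx, hnd'⟩
    rw [ih hnd']
    by_cases hxw : x = w
    · subst hxw
      simp [hx]
    · have : (List.count x [w] : Nat) = 0 := by
        simp [Ne.symm hxw]
      simp [this, Ne.symm hxw]

-- Σ over a duplicate-free vocabulary S of each word's occurrence count = countP (· ∈ S)
theorem sum_counts_eq_countP (words S : List String) (hnd : S.Nodup) :
    (S.map (fun k => ((words.count k : Nat) : Int))).sum
      = (words.countP (fun w => S.contains w) : Int) := by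
  induction words with
  | nil => simp
  | cons w ws ih =>
    have hsplit : ∀ k : String, ((w :: ws).count k : Int) = (ws.count k : Int) + ((List.count k [w] : Nat) : Int) := by
      intro k
      by_cases h : k = w <;> simp [h, List.count_cons]
    have : (S.map (fun k => (((w :: ws).count k : Nat) : Int))).sum
        = (S.map (fun k => ((ws.count k : Nat) : Int))).sum
          + (S.map (fun k => ((List.count k [w] : Nat) : Int))).sum := by
      simp only [funext hsplit]
      rw [← List.sum_map_add]
    rw [this, ih, sum_count_singleton _ _ hnd]
    cases h : S.contains w
    · have hm : w ∉ S := by simpa using h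
      simp [hm]
    · have hm : w ∈ S := List.contains_iff_mem.mp h
      simp [hm]

theorem score_core (words sw : List String) :
    (((((PySem.Set.ofList words).map (fun k => (k, ((words.count k : Nat) : Int)))).filter
        (fun wc => (PySem.Set.ofList sw).contains wc.1)).map (fun wc => wc.2)).sum)
      = (words.countP (fun w => sw.contains w) : Int) := by
  rw [List.filter_map, List.map_map]
  simp only [Function.comp_def]
  have hnd : ((PySem.Set.ofList words).filter
      (fun k => (PySem.Set.ofList sw).contains k)).Nodup := (PySem.Set.nodup_ofList words).filter _
  rw [sum_counts_eq_countP words _ hnd]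
  apply congrArg
  apply List.countP_congr
  intro a ha
  simp only [List.contains_iff_mem, List.mem_filter, PySem.Set.mem_ofList]
  constructor
  · rintro ⟨-, h⟩
    simpa using h
  · intro h
    exact ⟨by simpa using ha, by simpa using h⟩

theorem scoreB_eq (email : String) (sw : List String) :
    scoreB email (PySem.Set.ofList sw)
      = ((PySem.Str.split₀ (PySem.Str.lower email)).countP (fun w => sw.contains w) : Int) := by
  unfold scoreB
  simp only [PySem.Dict.foldl_insert_getD_add_one_eq_counter, PySem.Dict.items_counter]
  exact score_core _ sw

-- ===== VERDICT (by name: the statement is the Claim_ definition above) =====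
theorem getSpamEmails_spec : Claim_equal_getSpamEmails := by
  intro subjects spam_words _
  unfold Spec_getSpamEmails getSpamEmails getSpamEmails_alt
  simp only []
  have hA : (fun (returnList : List String) (email : String) =>
      let emailList := PySem.Str.split₀ (PySem.Str.lower email)
      let s1 : Int := emailList.foldl
        (fun s1 word => if (spam_words.map PySem.Str.lower).contains word then s1 + 1 else s1) 0
      if s1 ≥ 2 then returnList ++ ["spam"] else returnList ++ ["not_spam"])
    = fun returnList email => returnList ++
        [if ((PySem.Str.split₀ (PySem.Str.lower email)).countP
              (fun w => (spam_words.map PySem.Str.lower).contains w) : Int) ≥ 2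
         then "spam" else "not_spam"] := by
    funext ret email
    simp only [PySem.List.foldl_if_add_one, zero_add]
    split_ifs <;> rfl
  rw [hA, PySem.List.foldl_append_singleton_eq_map]
  simp [scoreB_eq]
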